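-- pv_equiv track=rewrite | github.com/pique0822/hupkes | MSE_plotting.py | recursive_sum
-- ===== SOURCE A (Python) =====
-- def apply(mode, value, symbol):
--     word2val = ['zero','one','two','three','four','five','six','seven','eight','nine','ten']
--
--     if symbol[0] == '-':
--         symbol_value = -word2val.index(symbol[1:])
--     else:
--         symbol_value = word2val.index(symbol)
--
--     if mode == 1: #addition
--         return value + symbol_value
--     elif mode == 0:
--         return value - symbol_value
--
-- def recursive_sum(expression):
--     result_stack = []
--     mode_stack = []
--     result = 0
--     # mode 1 is addition and mode 0 is subtraction
--     mode = 1
--     for symbol in expression: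
--         if symbol == '(':
--             mode_stack.append(mode)
--             result_stack.append(result)
--             result = 0
--             mode = 1
--         elif symbol == ')':
--             mode = mode_stack.pop()
--             prev_result = result_stack.pop()
--             if mode == 1: # addition
--                 result = prev_result + result
--             elif mode == 0:
--                 result = prev_result - result
--         elif symbol == 'plus':
--             mode = 1
--         elif symbol == 'minus':
--             mode = 0
--         else:
--             result = apply(mode, result, symbol)
--
--     return result
-- ===== SOURCE B (Python) =====
-- # Recursive-descent evaluator: the call stack holds the nested contexts
-- # instead of two explicit stacks.
-- _WORDS = ['zero','one','two','three','four','five','six','seven','eight','nine','ten']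
--
-- def _value(symbol):
--     if symbol[0] == '-':
--         return -_WORDS.index(symbol[1:])
--     return _WORDS.index(symbol)
--
-- def _parse(tokens, i):
--     """Evaluate tokens[i:] up to the next unmatched ')'; return (value, stop_index)."""
--     acc, sign = 0, 1
--     while i < len(tokens) and tokens[i] != ')':
--         tok = tokens[i]
--         i += 1
--         if tok == '(':
--             sub, i = _parse(tokens, i)
--             if i == len(tokens):
--                 raise ValueError("unmatched '('")
--             i += 1  # consume ')'
--             acc += sign * sub
--         elif tok == 'plus':
--             sign = 1
--         elif tok == 'minus':
--             sign = -1
--         else: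
--             acc += sign * _value(tok)
--     return acc, i
--
-- def recursive_sum(expression):
--     value, _ = _parse(list(expression), 0)
--     return value
-- ===== Notes on version B (the rewrite author's own statement) =====
-- stated objective: alternative
-- what changed: Replaces A's single fold over two explicit stacks (result_stack/mode_stack) by a recursive-descent parser whose call stack holds the nested contexts, each frame accumulating acc += sign*value; Pre_ excludes malformed expressions: unknown tokens and unmatched ')' make A raise, and on unmatched '(' A returns the innermost open group's partial value (leftover loop state) while B, as a parser, raises ValueError.
-- outside the precondition, e.g. on recursive_sum(['(', 'one']): A returns 1, B raises ValueError
import Mathlib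
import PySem

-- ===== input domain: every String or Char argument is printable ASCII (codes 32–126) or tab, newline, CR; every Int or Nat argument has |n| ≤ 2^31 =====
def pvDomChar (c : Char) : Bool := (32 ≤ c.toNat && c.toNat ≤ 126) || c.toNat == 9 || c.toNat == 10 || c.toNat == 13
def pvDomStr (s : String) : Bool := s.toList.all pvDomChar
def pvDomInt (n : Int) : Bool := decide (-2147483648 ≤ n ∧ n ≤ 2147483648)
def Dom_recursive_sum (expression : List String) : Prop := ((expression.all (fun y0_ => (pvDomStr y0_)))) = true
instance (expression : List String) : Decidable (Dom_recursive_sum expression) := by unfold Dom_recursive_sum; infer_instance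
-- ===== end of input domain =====

-- B replaces A's fold over two explicit stacks by a recursive-descent parser (same cost, different decomposition).

-- ===== PORT A =====
def word2valA : List String := ["zero","one","two","three","four","five","six","seven","eight","nine","ten"]

-- apply(mode, value, symbol); Python raises ValueError/IndexError on words outside word2val
-- (excluded by Pre_), where the port's .getD 0 defaults are never reached; mode is always 0 or 1.
def applyA (mode value : Int) (symbol : String) : Int :=
  let symbol_value : Int :=
    if PySem.Str.pyGet? symbol 0 = some '-' then
      -(((PySem.List.index? word2valA (PySem.Str.slice symbol (some 1) none)).getD 0 : Nat) : Int)
    else (((PySem.List.index? word2valA symbol).getD 0 : Nat) : Int)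
  if mode = 1 then value + symbol_value
  else if mode = 0 then value - symbol_value
  else value  -- unreachable: mode ∈ {0,1} always

-- one loop step; state = (result_stack, mode_stack, result, mode)
def stepA (st : List Int × List Int × Int × Int) (symbol : String) :
    List Int × List Int × Int × Int :=
  if symbol = "(" then (st.2.2.1 :: st.1, st.2.2.2 :: st.2.1, 0, 1)
  else if symbol = ")" then
    match st.2.1, st.1 with
    | mm :: ms', pr :: rs' =>
        (rs', ms', if mm = 1 then pr + st.2.2.1 else if mm = 0 then pr - st.2.2.1 else st.2.2.1, mm)
    | _, _ => (st.1, st.2.1, st.2.2.1, 0)  -- pop from empty stack: IndexError in Python, excluded by Pre_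
  else if symbol = "plus" then (st.1, st.2.1, st.2.2.1, 1)
  else if symbol = "minus" then (st.1, st.2.1, st.2.2.1, 0)
  else (st.1, st.2.1, applyA st.2.2.2 st.2.2.1 symbol, st.2.2.2)

def recursive_sum (expression : List String) : Int :=
  (List.foldl stepA ([], [], 0, 1) expression).2.2.1

-- ===== PORT B =====
def wordsB : List String := ["zero","one","two","three","four","five","six","seven","eight","nine","ten"]

def valueB (symbol : String) : Int :=
  if PySem.Str.pyGet? symbol 0 = some '-' then
    -(((PySem.List.index? wordsB (PySem.Str.slice symbol (some 1) none)).getD 0 : Nat) : Int)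
  else (((PySem.List.index? wordsB symbol).getD 0 : Nat) : Int)

-- _parse: remaining tokens play the role of Source B's index i (value, rest-after-stop);
-- fuel is a recursion bound only (recursive_sum_alt supplies length+1, enough for every input).
def parseB : Nat → List String → Int → Int → Int × List String
  | 0, toks, acc, _ => (acc, toks)
  | fuel + 1, toks, acc, sign =>
    match toks with
    | [] => (acc, [])
    | tok :: rest =>
      if tok = ")" then (acc, tok :: rest)
      else if tok = "(" then
        match parseB fuel rest 0 1 with
        | (sub, rem) =>
          match rem with
          | [] => (acc, [])  -- raise ValueError("unmatched '('") in Source B; outside Pre_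
          | _ :: rem' => parseB fuel rem' (acc + sign * sub) sign
      else if tok = "plus" then parseB fuel rest acc 1
      else if tok = "minus" then parseB fuel rest acc (-1)
      else parseB fuel rest (acc + sign * valueB tok) sign

def recursive_sum_alt (expression : List String) : Int :=
  (parseB (expression.length + 1) expression 0 1).1

-- ===== PRECONDITION & SPEC =====
-- Python A raises on any token outside the 26 recognised ones (ValueError from list.index,
-- IndexError on '') and on any prefix with more ')' than '(' (pop from an empty stack); Pre_
-- excludes those, and also excludes expressions with unmatched '(' — there A returns the
-- partial value of the innermost open group (leftover loop state) while B's parser raises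
-- ValueError, so B returns no value to compare.
def allowedTokens : List String :=
  ["(", ")", "plus", "minus",
   "zero","one","two","three","four","five","six","seven","eight","nine","ten",
   "-zero","-one","-two","-three","-four","-five","-six","-seven","-eight","-nine","-ten"]

def Pre_recursive_sum (expression : List String) : Prop :=
  (∀ s ∈ expression, s ∈ allowedTokens) ∧
  (∀ n : Nat, n < expression.length + 1 →
    (expression.take n).count ")" ≤ (expression.take n).count "(") ∧
  expression.count "(" = expression.count ")"

instance (expression : List String) : Decidable (Pre_recursive_sum expression) := by
  unfold Pre_recursive_sum; infer_instance

def pvWitness_recursive_sum : List String :=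
  ["(", "one", "plus", "two", ")", "minus", "-three"]

def Spec_recursive_sum (expression : List String) (out : Int) : Prop := out = recursive_sum_alt expression
instance (expression : List String) (out : Int) : Decidable (Spec_recursive_sum expression out) := by unfold Spec_recursive_sum; infer_instance

-- ===== CLAIM (what is proved, stated in full; the proofs are below) =====
def Claim_equal_recursive_sum : Prop := ∀ (expression : List String), Dom_recursive_sum expression → Pre_recursive_sum expression → Spec_recursive_sum expression (recursive_sum expression)

-- ===== LEMMAS AND PROOFS =====

theorem applyA_eq_valueB (m r s : Int) (tok : String)
    (hm : (m = 1 ∧ s = 1) ∨ (m = 0 ∧ s = -1)) :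
    applyA m r tok = r + s * valueB tok := by
  rcases hm with ⟨h, h'⟩ | ⟨h, h'⟩ <;> subst h <;> subst h'
  · simp [applyA, valueB, word2valA, wordsB]
  · rw [neg_one_mul, ← sub_eq_add_neg]
    simp [applyA, valueB, word2valA, wordsB]

theorem parseB_foldA (fuel : Nat) :
    ∀ (l : List String) (r m s : Int) (rs ms : List Int),
      ((m = 1 ∧ s = 1) ∨ (m = 0 ∧ s = -1)) → l.length + 1 ≤ fuel →
      l.count "(" ≤ l.count ")" →
      ∃ l₁ m₂,
        l = l₁ ++ (parseB fuel l r s).2 ∧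
        l₁.count "(" = l₁.count ")" ∧
        List.foldl stepA (rs, ms, r, m) l₁ = (rs, ms, (parseB fuel l r s).1, m₂) ∧
        ((parseB fuel l r s).2 ≠ [] → ∃ t, (parseB fuel l r s).2 = ")" :: t) := by
  induction fuel with
  | zero => intro l r m s rs ms _ hf; omega
  | succ fuel IH =>
    intro l r m s rs ms hm hf hc
    match l with
    | [] =>
      exact ⟨[], m, by simp [parseB], by simp, by simp [parseB], by simp [parseB]⟩
    | tok :: rest =>
      by_cases h1 : tok = ")"
      · subst h1
        have hev : parseB (fuel + 1) (")" :: rest) r s = (r, ")" :: rest) := by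
          simp [parseB]
        rw [hev]
        exact ⟨[], m, by simp, by simp, by simp, fun _ => ⟨rest, rfl⟩⟩
      · by_cases h2 : tok = "("
        · subst h2
          rcases hrec : parseB fuel rest 0 1 with ⟨sub, rem⟩
          have hlen1 : rest.length + 1 ≤ fuel := by simp at hf; omega
          have hc1 : rest.count "(" + 1 ≤ rest.count ")" := by
            simp at hc; omega
          obtain ⟨l₁', m₂', hsplit, hcnt, hfoldin, hhead⟩ :=
            IH rest 0 1 1 (r :: rs) (m :: ms) (Or.inl ⟨rfl, rfl⟩) hlen1 (by omega)
          rw [hrec] at hsplit hfoldin hhead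
          simp only at hsplit hfoldin hhead
          have hrem : ∃ t, rem = ")" :: t := by
            apply hhead
            intro hnil
            subst hnil
            rw [hsplit] at hc1
            simp at hc1
            omega
          obtain ⟨rem', hrem'⟩ := hrem
          subst hrem'
          have hev : parseB (fuel + 1) ("(" :: rest) r s
              = parseB fuel rem' (r + s * sub) s := by
            simp [parseB, hrec]
          rw [hev]
          have hstep1 : stepA (rs, ms, r, m) "(" = (r :: rs, m :: ms, 0, 1) := by
            simp [stepA]
          have hstep2 : stepA (r :: rs, m :: ms, sub, m₂') ")"
              = (rs, ms, r + s * sub, m) := by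
            rcases hm with ⟨h, h'⟩ | ⟨h, h'⟩ <;> subst h <;> subst h' <;>
              simp [stepA] <;> ring_nf
          have hlenrest : rest.length = l₁'.length + 1 + rem'.length := by
            rw [hsplit]; simp; omega
          have hlen2 : rem'.length + 1 ≤ fuel := by simp at hf; omega
          have hc2 : rem'.count "(" ≤ rem'.count ")" := by
            rw [hsplit] at hc1
            simp [List.count_append, hcnt] at hc1 ⊢
            omega
          obtain ⟨l₁'', m₂'', hsp2, hcnt2, hfo2, hhead2⟩ :=
            IH rem' (r + s * sub) m s rs ms hm hlen2 hc2
          refine ⟨"(" :: l₁' ++ ")" :: l₁'', m₂'', ?_, ?_, ?_, hhead2⟩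
          · conv_lhs => rw [hsplit, hsp2]
            simp
          · simp [List.count_append, hcnt, hcnt2]
            omega
          · rw [List.cons_append, List.foldl_cons, hstep1, List.foldl_append,
              hfoldin, List.foldl_cons, hstep2]
            exact hfo2
        · -- plus / minus / number token: same stacks, new (acc, mode/sign)
          have hcommon : ∀ (r' m' s' : Int), ((m' = 1 ∧ s' = 1) ∨ (m' = 0 ∧ s' = -1)) →
              parseB (fuel + 1) (tok :: rest) r s = parseB fuel rest r' s' →
              stepA (rs, ms, r, m) tok = (rs, ms, r', m') →
              ∃ l₁ m₂,
                tok :: rest = l₁ ++ (parseB (fuel + 1) (tok :: rest) r s).2 ∧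
                l₁.count "(" = l₁.count ")" ∧
                List.foldl stepA (rs, ms, r, m) l₁
                  = (rs, ms, (parseB (fuel + 1) (tok :: rest) r s).1, m₂) ∧
                ((parseB (fuel + 1) (tok :: rest) r s).2 ≠ [] →
                  ∃ t, (parseB (fuel + 1) (tok :: rest) r s).2 = ")" :: t) := by
            intro r' m' s' hm' hev hstep
            have hlen1 : rest.length + 1 ≤ fuel := by simp at hf; omega
            have hc1 : rest.count "(" ≤ rest.count ")" := by
              simp [h1, h2] at hc ⊢; omega
            obtain ⟨l₁', m₂', hsplit, hcnt, hfoldin, hhead⟩ :=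
              IH rest r' m' s' rs ms hm' hlen1 hc1
            rw [hev]
            have hsplit' : tok :: rest = tok :: l₁' ++ (parseB fuel rest r' s').2 := by
              rw [List.cons_append]; exact congrArg _ hsplit
            refine ⟨tok :: l₁', m₂', hsplit', ?_, ?_, hhead⟩
            · simp [h1, h2, hcnt]
            · rw [List.foldl_cons, hstep]
              exact hfoldin
          by_cases h3 : tok = "plus"
          · subst h3
            exact hcommon r 1 1 (Or.inl ⟨rfl, rfl⟩) (by simp [parseB]) (by simp [stepA])
          · by_cases h4 : tok = "minus"
            · subst h4
              exact hcommon r 0 (-1) (Or.inr ⟨rfl, rfl⟩) (by simp [parseB]) (by simp [stepA])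
            · exact hcommon (r + s * valueB tok) m s hm
                (by simp [parseB, h1, h2, h3, h4])
                (by simp [stepA, h1, h2, h3, h4]
                    exact applyA_eq_valueB m r s tok hm)

-- ===== VERDICT (by name: the statement is the Claim_ definition above) =====
theorem recursive_sum_spec : Claim_equal_recursive_sum := by
  intro e _dom hpre
  show recursive_sum e = recursive_sum_alt e
  obtain ⟨_, hpref, hbal⟩ := hpre
  obtain ⟨l₁, m₂, hsplit, hcnt, hfold, hhead⟩ :=
    parseB_foldA (e.length + 1) e 0 1 1 [] [] (Or.inl ⟨rfl, rfl⟩) (le_refl _)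
      (le_of_eq hbal)
  have hnil : (parseB (e.length + 1) e 0 1).2 = [] := by
    by_contra hne
    obtain ⟨t, ht⟩ := hhead hne
    rw [ht] at hsplit
    have hb := hpref (l₁.length + 1) (by rw [hsplit]; simp)
    have htake : (l₁ ++ ")" :: t).take (l₁.length + 1) = l₁ ++ [")"] := by
      simp [List.take_append]
    rw [hsplit, htake] at hb
    simp [List.count_append] at hb
    omega
  rw [hnil, List.append_nil] at hsplit
  subst hsplit
  simp only [recursive_sum, recursive_sum_alt, hfold]
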